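-- pv_equiv track=rewrite | github.com/Pooryamb/PseudoGene | scripts/backconvert_axidtree.py | map_axidtree2geneid
-- ===== SOURCE A (Python) =====
-- def map_axidtree2geneid(axid_tree, id_mapping):
--     non_alnums = ['(', ')', ',', ':']
--     for char in non_alnums:
--         axid_tree = axid_tree.replace(char, f"\n{char}\n")
--     parts = axid_tree.split("\n")
--     geneid_parts = []
--     for part in parts:
--         if part.startswith("A"):
--             geneid_parts.append(id_mapping[part.strip()])
--             if part.strip()=="A0":
--                 geneid_parts.append("{test}")
--         else:
--             geneid_parts.append(part)
--     return "".join(geneid_parts) + "\n"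
-- ===== SOURCE B (Python) =====
-- def map_axidtree2geneid(axid_tree, id_mapping):
--     # single left-to-right scan; delimiters flush the current token buffer
--     out = []
--     buf = []
--
--     def flush():
--         part = ''.join(buf)
--         if part.startswith('A'):
--             out.append(id_mapping[part.strip()])
--             if part.strip() == 'A0':
--                 out.append('{test}')
--         else:
--             out.append(part)
--         buf.clear()
--
--     for ch in axid_tree:
--         if ch in '():,':
--             flush()
--             out.append(ch)
--         elif ch == '\n':
--             flush()
--         else:
--             buf.append(ch)
--     flush()
--     return ''.join(out) + '\n'
-- ===== Notes on version B (the rewrite author's own statement) =====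
-- stated objective: alternative
-- what changed: Replaced A's four full replace passes plus a split pass and a part-mapping pass by one left-to-right scan over the characters that buffers the current token and flushes it at each delimiter, appending delimiters directly.
import Mathlib
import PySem

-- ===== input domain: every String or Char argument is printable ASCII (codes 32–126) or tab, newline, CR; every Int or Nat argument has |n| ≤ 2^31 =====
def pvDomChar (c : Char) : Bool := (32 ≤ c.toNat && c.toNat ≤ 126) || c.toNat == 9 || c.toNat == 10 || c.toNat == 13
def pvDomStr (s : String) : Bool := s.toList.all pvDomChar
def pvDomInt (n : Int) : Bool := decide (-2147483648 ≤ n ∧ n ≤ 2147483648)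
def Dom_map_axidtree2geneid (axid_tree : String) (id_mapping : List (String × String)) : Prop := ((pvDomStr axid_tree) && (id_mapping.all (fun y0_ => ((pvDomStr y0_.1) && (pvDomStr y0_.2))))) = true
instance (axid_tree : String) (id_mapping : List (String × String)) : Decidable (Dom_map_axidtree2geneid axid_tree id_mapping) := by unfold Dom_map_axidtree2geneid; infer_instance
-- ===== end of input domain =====

-- B replaces A's four-pass replace-then-split tokenization by a single left-to-right scan with a
-- token buffer (objective: alternative single-pass decomposition; same return value on Pre_).

-- ===== PORT A =====
-- literal port of A: four replace passes, split on "\n", process the parts, join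
def map_axidtree2geneid (axid_tree : String) (id_mapping : List (String × String)) : String :=
  let d := PySem.Dict.ofList id_mapping
  let replaced := (['(', ')', ',', ':'] : List Char).foldl
    (fun s c => PySem.Str.replace s (String.ofList [c]) (String.ofList ['\n', c, '\n'])) axid_tree
  let parts := (PySem.Str.split? replaced "\n").getD []
  let geneid_parts := parts.foldl (fun acc part =>
    if PySem.Str.startswith part "A" then
      let acc1 := acc ++ [d.getD (PySem.Str.strip part) ""]   -- dict lookup; KeyError excluded by Pre_
      if PySem.Str.strip part == "A0" then acc1 ++ ["{test}"] else acc1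
    else acc ++ [part]) ([] : List String)
  PySem.Str.join "" geneid_parts ++ "\n"

-- ===== PORT B =====
-- B's flush(): process the buffered token exactly once
def pvFlush (d : PySem.Dict String String) (out : List String) (buf : List Char) : List String :=
  let part := String.ofList buf
  if PySem.Str.startswith part "A" then
    let out1 := out ++ [d.getD (PySem.Str.strip part) ""]     -- dict lookup; KeyError excluded by Pre_
    if PySem.Str.strip part == "A0" then out1 ++ ["{test}"] else out1
  else out ++ [part]

-- B's for-loop over the characters of axid_tree
def pvScan (d : PySem.Dict String String) : List Char → List Char → List String → List String
  | [], buf, out => pvFlush d out buf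
  | c :: cs, buf, out =>
    if c = '(' ∨ c = ')' ∨ c = ',' ∨ c = ':' then
      pvScan d cs [] (pvFlush d out buf ++ [String.ofList [c]])
    else if c = '\n' then pvScan d cs [] (pvFlush d out buf)
    else pvScan d cs (buf ++ [c]) out

def map_axidtree2geneid_alt (axid_tree : String) (id_mapping : List (String × String)) : String :=
  PySem.Str.join "" (pvScan (PySem.Dict.ofList id_mapping) axid_tree.toList [] []) ++ "\n"

-- ===== PRECONDITION & SPEC =====
-- the token list A's tokenization produces (pieces between '(' ')' ',' ':' and newline)
def pvTokens : List Char → List (List Char)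
  | [] => [[]]
  | c :: cs =>
    if c = '(' ∨ c = ')' ∨ c = ',' ∨ c = ':' then [] :: [c] :: pvTokens cs
    else if c = '\n' then [] :: pvTokens cs
    else match pvTokens cs with
      | [] => [[c]]
      | t :: ts => (c :: t) :: ts

-- Pre_ excludes exactly the inputs on which A raises KeyError: some token starting with 'A'
-- whose stripped form is not a key of id_mapping
def Pre_map_axidtree2geneid (axid_tree : String) (id_mapping : List (String × String)) : Prop :=
  ∀ t ∈ pvTokens axid_tree.toList, PySem.Chars.startswith t ['A'] = true →
    (PySem.Dict.ofList id_mapping).contains (String.ofList (PySem.Chars.strip t)) = true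

instance (axid_tree : String) (id_mapping : List (String × String)) : Decidable (Pre_map_axidtree2geneid axid_tree id_mapping) := by unfold Pre_map_axidtree2geneid; infer_instance

def pvWitness_map_axidtree2geneid : String × (List (String × String)) :=
  ("(A0:1,A1 :2)", [("A0", "g77"), ("A1", "g42")])

def Spec_map_axidtree2geneid (axid_tree : String) (id_mapping : List (String × String)) (out : String) : Prop := out = map_axidtree2geneid_alt axid_tree id_mapping
instance (axid_tree : String) (id_mapping : List (String × String)) (out : String) : Decidable (Spec_map_axidtree2geneid axid_tree id_mapping out) := by unfold Spec_map_axidtree2geneid; infer_instance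

-- ===== CLAIM (what is proved, stated in full; the proofs are below) =====
def Claim_equal_map_axidtree2geneid : Prop := ∀ (axid_tree : String) (id_mapping : List (String × String)), Dom_map_axidtree2geneid axid_tree id_mapping → Pre_map_axidtree2geneid axid_tree id_mapping → Spec_map_axidtree2geneid axid_tree id_mapping (map_axidtree2geneid axid_tree id_mapping)

-- ===== LEMMAS AND PROOFS =====

-- the substitution one replace pass performs on each character
def pvRep (d : Char) (c : Char) : List Char := if c = d then ['\n', d, '\n'] else [c]

-- the substitution A's four replace passes perform in total
def pvSub (c : Char) : List Char :=
  if c = '(' ∨ c = ')' ∨ c = ',' ∨ c = ':' then ['\n', c, '\n'] else [c]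

-- raw split of a char list at '\n'
def pvSplitNl : List Char → List (List Char)
  | [] => [[]]
  | c :: cs => if c = '\n' then [] :: pvSplitNl cs
               else match pvSplitNl cs with
                    | [] => [[c]]
                    | t :: ts => (c :: t) :: ts

theorem pvSplitNl_ne_nil (cs : List Char) : pvSplitNl cs ≠ [] := by
  cases cs with
  | nil => simp [pvSplitNl]
  | cons c t =>
    simp only [pvSplitNl]
    split
    · simp
    · split <;> simp

theorem pvTokens_ne_nil (cs : List Char) : pvTokens cs ≠ [] := by
  cases cs with
  | nil => simp [pvTokens]
  | cons c t =>
    simp only [pvTokens]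
    split
    · simp
    · split
      · simp
      · split <;> simp

-- single-character replace is a flatMap
theorem replace_go_single (d : Char) (new : List Char) :
    ∀ (fuel : Nat) (l acc : List Char), l.length ≤ fuel →
      PySem.Chars.replace.go [d] new fuel l acc
        = acc.reverse ++ l.flatMap (fun c => if c = d then new else [c]) := by
  intro fuel
  induction fuel with
  | zero => intro l acc h; cases l with
    | nil => simp [PySem.Chars.replace.go]
    | cons c t => simp at h
  | succ n ih =>
    intro l acc h
    cases l with
    | nil => simp [PySem.Chars.replace.go]
    | cons c t =>
      rw [PySem.Chars.replace.go]
      by_cases hc : c = d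
      · subst hc
        have hp : List.isPrefixOf [c] (c :: t) = true := by simp [List.isPrefixOf]
        rw [hp]
        simp only [if_pos]
        rw [ih _ _ (by simp at h ⊢; omega)]
        simp
      · have hp : List.isPrefixOf [d] (c :: t) = false := by
          simp [List.isPrefixOf]; exact fun hh => hc hh.symm
        rw [hp]
        simp only [Bool.false_eq_true, if_false]
        rw [ih _ _ (by simp at h ⊢; omega)]
        simp [hc]

theorem replace_single (d : Char) (new cs : List Char) :
    PySem.Chars.replace cs [d] new = cs.flatMap (fun c => if c = d then new else [c]) := by
  rw [PySem.Chars.replace]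
  simp only [List.isEmpty_cons, Bool.false_eq_true, if_false]
  exact replace_go_single d new cs.length cs [] (le_refl _)

-- splitOn at "\n" computes pvSplitNl
theorem splitOn_go_nl : ∀ (fuel : Nat) (l cur : List Char) (acc : List (List Char)), l.length < fuel →
    PySem.Chars.splitOn.go ['\n'] fuel l cur acc
      = acc.reverse ++ (match pvSplitNl l with | [] => [] | t :: ts => (cur.reverse ++ t) :: ts) := by
  intro fuel
  induction fuel with
  | zero => intro l cur acc h; exact absurd h (by omega)
  | succ n ih =>
    intro l cur acc h
    cases l with
    | nil => simp [PySem.Chars.splitOn.go, pvSplitNl]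
    | cons c t =>
      rw [PySem.Chars.splitOn.go]
      by_cases hc : c = '\n'
      · subst hc
        have hp : List.isPrefixOf ['\n'] ('\n' :: t) = true := by simp [List.isPrefixOf]
        rw [hp]
        simp only [if_pos]
        rw [ih _ _ _ (by simp at h ⊢; omega)]
        simp only [pvSplitNl]
        cases ht : pvSplitNl t with
        | nil => exact absurd ht (pvSplitNl_ne_nil t)
        | cons a as => simp [ht]
      · have hp : List.isPrefixOf ['\n'] (c :: t) = false := by
          simp [List.isPrefixOf]; exact fun hh => hc hh.symm
        rw [hp]
        simp only [Bool.false_eq_true, if_false]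
        rw [ih _ _ _ (by simp at h ⊢; omega)]
        simp only [pvSplitNl, if_neg hc]
        cases ht : pvSplitNl t with
        | nil => exact absurd ht (pvSplitNl_ne_nil t)
        | cons a as => simp

theorem splitOn_nl (cs : List Char) :
    PySem.Chars.splitOn cs ['\n'] = pvSplitNl cs := by
  rw [PySem.Chars.splitOn]
  rw [splitOn_go_nl _ _ _ _ (by omega)]
  cases ht : pvSplitNl cs with
  | nil => exact absurd ht (pvSplitNl_ne_nil cs)
  | cons a as => simp

-- splitting the fully substituted string yields the tokens
theorem splitNl_flatMap_sub (cs : List Char) :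
    pvSplitNl (cs.flatMap pvSub) = pvTokens cs := by
  induction cs with
  | nil => simp [pvSplitNl, pvTokens]
  | cons c t ih =>
    by_cases hd : c = '(' ∨ c = ')' ∨ c = ',' ∨ c = ':'
    · have hcn : c ≠ '\n' := by rcases hd with h|h|h|h <;> subst h <;> decide
      simp only [List.flatMap_cons, pvSub, if_pos hd]
      simp only [List.cons_append, List.nil_append, pvSplitNl, if_neg hcn]
      rw [ih]
      simp [pvTokens, hd]
    · by_cases hn : c = '\n'
      · subst hn
        simp only [List.flatMap_cons, pvSub, if_neg hd]
        simp only [List.cons_append, List.nil_append, pvSplitNl]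
        rw [ih]
        simp [pvTokens]
      · simp only [List.flatMap_cons, pvSub, if_neg hd]
        simp only [List.cons_append, List.nil_append, pvSplitNl, if_neg hn]
        rw [ih]
        simp only [pvTokens, if_neg hd, if_neg hn]

-- the four sequential replace passes are one simultaneous substitution
theorem sub_chain (cs : List Char) :
    (((cs.flatMap (pvRep '(')).flatMap (pvRep ')')).flatMap (pvRep ',')).flatMap (pvRep ':')
      = cs.flatMap pvSub := by
  simp only [List.flatMap_assoc]
  have h : (fun c => (pvRep '(' c).flatMap fun c => (pvRep ')' c).flatMap fun c => (pvRep ',' c).flatMap (pvRep ':')) = pvSub := by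
    funext c
    by_cases h1 : c = '(' ; · subst h1; decide
    by_cases h2 : c = ')' ; · subst h2; decide
    by_cases h3 : c = ',' ; · subst h3; decide
    by_cases h4 : c = ':' ; · subst h4; decide
    simp [pvRep, pvSub, h1, h2, h3, h4]
  rw [h]

-- flushing a one-delimiter buffer just appends that delimiter
theorem pvFlush_delim (d : PySem.Dict String String) (out : List String) (c : Char)
    (h : c = '(' ∨ c = ')' ∨ c = ',' ∨ c = ':') :
    pvFlush d out [c] = out ++ [String.ofList [c]] := by
  have hA : c ≠ 'A' := by rcases h with h|h|h|h <;> subst h <;> decide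
  simp [pvFlush, PySem.Str.startswith, PySem.Chars.startswith, List.isPrefixOf]
  exact fun hh => absurd hh.symm hA

-- B's scan is the fold of A's per-part step over the tokens (buffer prefixed to the first one)
theorem pvScan_eq (d : PySem.Dict String String) (cs : List Char) :
    ∀ buf out, pvScan d cs buf out =
      (match pvTokens cs with
       | [] => []
       | t :: ts => (buf ++ t) :: ts).foldl (fun acc t => pvFlush d acc t) out := by
  induction cs with
  | nil => intro buf out; simp [pvScan, pvTokens]
  | cons c cs ih =>
    intro buf out
    by_cases hd : c = '(' ∨ c = ')' ∨ c = ',' ∨ c = ':'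
    · rw [pvScan, if_pos hd, ih]
      simp only [pvTokens, if_pos hd]
      cases ht : pvTokens cs with
      | nil => exact absurd ht (pvTokens_ne_nil cs)
      | cons a as =>
        simp [List.foldl_cons, pvFlush_delim d _ c hd]
    · by_cases hn : c = '\n'
      · subst hn
        rw [pvScan, if_neg hd, if_pos rfl, ih]
        simp only [pvTokens, if_neg hd]
        cases ht : pvTokens cs with
        | nil => exact absurd ht (pvTokens_ne_nil cs)
        | cons a as => simp
      · rw [pvScan, if_neg hd, if_neg hn, ih]
        simp only [pvTokens, if_neg hd, if_neg hn]
        cases ht : pvTokens cs with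
        | nil => exact absurd ht (pvTokens_ne_nil cs)
        | cons a as => simp

theorem ports_agree (axid_tree : String) (id_mapping : List (String × String)) :
    map_axidtree2geneid axid_tree id_mapping = map_axidtree2geneid_alt axid_tree id_mapping := by
  simp only [map_axidtree2geneid, map_axidtree2geneid_alt]
  have hrep : ((['(', ')', ',', ':'] : List Char).foldl
      (fun s c => PySem.Str.replace s (String.ofList [c]) (String.ofList ['\n', c, '\n'])) axid_tree).toList
      = axid_tree.toList.flatMap pvSub := by
    simp only [List.foldl_cons, List.foldl_nil, PySem.Str.replace, String.toList_ofList]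
    rw [replace_single, replace_single, replace_single, replace_single]
    exact sub_chain axid_tree.toList
  have hparts : (PySem.Str.split? ((['(', ')', ',', ':'] : List Char).foldl
      (fun s c => PySem.Str.replace s (String.ofList [c]) (String.ofList ['\n', c, '\n'])) axid_tree) "\n").getD []
      = (pvTokens axid_tree.toList).map String.ofList := by
    rw [PySem.Str.split?, PySem.Chars.split?]
    simp only [show ("\n" : String).toList = ['\n'] from rfl]
    rw [if_neg (by simp)]
    rw [splitOn_nl, hrep, splitNl_flatMap_sub]
    rfl
  rw [hparts, pvScan_eq]
  cases ht : pvTokens axid_tree.toList with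
  | nil => exact absurd ht (pvTokens_ne_nil _)
  | cons a as =>
    simp only [List.nil_append, List.foldl_map]
    rfl

-- ===== VERDICT (by name: the statement is the Claim_ definition above) =====
theorem map_axidtree2geneid_spec : Claim_equal_map_axidtree2geneid := by
  intro axid_tree id_mapping _ _
  unfold Spec_map_axidtree2geneid
  exact ports_agree axid_tree id_mapping
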